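-- pv_equiv track=rewrite | github.com/rhyswells101/Combinatorics2021 | k_partitions.py | segmentations
-- ===== SOURCE A (Python) =====
-- from itertools import combinations
--
-- def segmentations(a, k):
--     n = len(a)
--     assert 1 <= k <= n, (n, k)
--
--     def split_at(js):
--         i = 0
--
--         for j in js:
--             yield a[i:j] # a is the inital set [1,2,3,4]
--             #slice of s from i to j is replaced by the contents of the iterable t
--             i = j
--
--         yield a[i:]
--
--     for separations in combinations(range(1, n), k - 1):
--         yield list(split_at(separations))
-- ===== SOURCE B (Python) =====
-- def segmentations(a, k):
--     n = len(a)
--     assert 1 <= k <= n, (n, k)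
--
--     def splits(rem, m):
--         # split rem into m non-empty contiguous parts, first cut slowest
--         if m == 1:
--             yield [rem]
--         else:
--             for j in range(1, len(rem) - (m - 1) + 1):
--                 for tail in splits(rem[j:], m - 1):
--                     yield [rem[:j]] + tail
--
--     yield from splits(a, k)
-- ===== Notes on version B (the rewrite author's own statement) =====
-- stated objective: alternative
-- what changed: Replaces the combinations-of-cut-points enumeration (itertools.combinations over range(1,n) plus a split_at pass over the whole list per combination) with a direct recursion that chooses the first segment's length and recursively segments the remaining suffix into k-1 parts.
import Mathlib
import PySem

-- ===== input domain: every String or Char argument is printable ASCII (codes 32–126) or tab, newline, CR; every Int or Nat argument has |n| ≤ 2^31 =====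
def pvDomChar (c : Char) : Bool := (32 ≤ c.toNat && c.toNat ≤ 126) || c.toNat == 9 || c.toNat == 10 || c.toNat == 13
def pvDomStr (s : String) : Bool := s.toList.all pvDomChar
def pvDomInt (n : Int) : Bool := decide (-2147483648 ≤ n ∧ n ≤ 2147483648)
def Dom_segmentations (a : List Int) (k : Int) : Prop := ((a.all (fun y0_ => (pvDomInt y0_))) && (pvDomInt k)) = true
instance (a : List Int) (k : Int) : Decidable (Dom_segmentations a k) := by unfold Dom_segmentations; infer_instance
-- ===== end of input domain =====

-- B replaces the combinations-of-cut-points enumeration with a direct recursion on the number of parts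
-- (choose the first segment, recurse on the suffix); same output order, no speed claim.
-- (Python A/B are generators; equivalence is about the list of yielded values.)


-- ===== PORT A =====
-- split_at(js): yields a[i:j] for each separator j (i = previous separator, initially 0), then a[i:]
def splitA (a : List Int) (i : Int) : List Int → List (List Int)
  | [] => [PySem.List.slice a (some i) none]
  | j :: js => PySem.List.slice a (some i) (some j) :: splitA a j js

def segmentations (a : List Int) (k : Int) : List (List (List Int)) :=
  let n : Int := (a.length : Int)
  if 1 ≤ k ∧ k ≤ n then
    (PySem.List.combinations (PySem.List.pyRange 1 n 1) (k - 1).toNat).map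
      (fun separations => splitA a 0 separations)
  else []  -- assertion fails in Python; excluded by Pre_

-- ===== PORT B =====
-- splits(rem, m): m == 1 yields [rem]; else loop j over range(1, len(rem)-(m-1)+1), prepend rem[:j]
def splitsB (m : Nat) (rem : List Int) : List (List (List Int)) :=
  match m with
  | 0 => []  -- unreachable under the assertion
  | 1 => [[rem]]
  | m' + 2 =>
    (PySem.List.pyRange 1 ((rem.length : Int) - ((m' + 2 : Int) - 1) + 1) 1).flatMap
      (fun j => (splitsB (m' + 1) (PySem.List.slice rem (some j) none)).map
        (fun tail => PySem.List.slice rem none (some j) :: tail))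

def segmentations_alt (a : List Int) (k : Int) : List (List (List Int)) :=
  let n : Int := (a.length : Int)
  if 1 ≤ k ∧ k ≤ n then splitsB k.toNat a
  else []  -- assertion fails in Python; excluded by Pre_

-- ===== PRECONDITION & SPEC =====
-- Pre_ is exactly where A's 'assert 1 <= k <= n' passes (outside it A raises AssertionError).
def Pre_segmentations (a : List Int) (k : Int) : Prop := 1 ≤ k ∧ k ≤ (a.length : Int)
instance (a : List Int) (k : Int) : Decidable (Pre_segmentations a k) := by unfold Pre_segmentations; infer_instance
def pvWitness_segmentations : List Int × Int := ([1, 2, 3, 4], 2)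

def Spec_segmentations (a : List Int) (k : Int) (out : List (List (List Int))) : Prop := out = segmentations_alt a k
instance (a : List Int) (k : Int) (out : List (List (List Int))) : Decidable (Spec_segmentations a k out) := by unfold Spec_segmentations; infer_instance

-- ===== CLAIM (what is proved, stated in full; the proofs are below) =====
def Claim_equal_segmentations : Prop := ∀ (a : List Int) (k : Int), Dom_segmentations a k → Pre_segmentations a k → Spec_segmentations a k (segmentations a k)

-- ===== LEMMAS AND PROOFS =====

-- choosing the first element of a combination from a run of consecutive candidates
lemma comb_range_flat (b : Int) (m : Nat) : ∀ (s : Int),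
    PySem.List.combinations (PySem.List.pyRange s b 1) (m + 1)
      = (PySem.List.pyRange s b 1).flatMap
          (fun j => (PySem.List.combinations (PySem.List.pyRange (j + 1) b 1) m).map (j :: ·)) := by
  intro s
  by_cases hsb : b ≤ s
  · rw [PySem.List.pyRange_one_eq_nil hsb]
    simp [PySem.List.combinations_nil_succ]
  · have hsb' : s < b := by omega
    have hlt : (b - (s + 1)).toNat < (b - s).toNat := by omega
    rw [PySem.List.pyRange_one_cons hsb', PySem.List.combinations_cons_succ,
        List.flatMap_cons]
    congr 1
    exact comb_range_flat b m (s + 1)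
termination_by s => (b - s).toNat

lemma main_inv (a : List Int) (m : Nat) : ∀ (i : Int), 0 ≤ i → i + (m + 1) ≤ (a.length : Int) →
    (PySem.List.combinations (PySem.List.pyRange (i + 1) (a.length : Int) 1) m).map (splitA a i)
      = splitsB (m + 1) (a.drop i.toNat) := by
  induction m with
  | zero =>
    intro i h0 hn
    rw [PySem.List.combinations_zero]
    simp only [List.map_cons, List.map_nil, splitsB]
    rw [show splitA a i [] = [PySem.List.slice a (some i) none] from rfl,
        PySem.List.slice_from a h0]
  | succ m ih =>
    intro i h0 hn
    set n : Int := (a.length : Int) with hndef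
    have hrlen : ((a.drop i.toNat).length : Int) = n - i := by
      rw [List.length_drop]; omega
    rw [comb_range_flat, List.map_flatMap]
    show _ = splitsB (m + 2) (a.drop i.toNat)
    rw [show splitsB (m + 2) (a.drop i.toNat)
        = (PySem.List.pyRange 1 (((a.drop i.toNat).length : Int) - ((m + 2 : Int) - 1) + 1) 1).flatMap
            (fun j => (splitsB (m + 1) (PySem.List.slice (a.drop i.toNat) (some j) none)).map
              (fun tail => PySem.List.slice (a.drop i.toNat) none (some j) :: tail)) from rfl,
        hrlen, show n - i - ((m + 2 : Int) - 1) + 1 = n - m - i by ring]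
    -- split the LHS range at n - m; the high part contributes nothing
    rw [PySem.List.pyRange_one_append (i + 1) (n - m) n (by omega) (by omega), List.flatMap_append]
    have htail : (PySem.List.pyRange (n - m) n 1).flatMap
        (fun j => ((PySem.List.combinations (PySem.List.pyRange (j + 1) n 1) m).map (j :: ·)).map (splitA a i)) = [] := by
      rw [List.flatMap_eq_nil_iff]
      intro j hj
      rw [PySem.List.mem_pyRange_one] at hj
      have hlen : (PySem.List.pyRange (j + 1) n 1).length < m := by
        rw [PySem.List.length_pyRange_one]; omega
      rw [PySem.List.combinations_eq_nil_of_length_lt _ hlen]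
      rfl
    rw [htail, List.append_nil]
    -- reindex both ranges over List.range
    rw [PySem.List.pyRange_one (i + 1) (n - m), PySem.List.pyRange_one 1 (n - m - i),
        show (n - m - i - 1).toNat = (n - m - (i + 1)).toNat by omega,
        List.flatMap_map, List.flatMap_map]
    refine List.flatMap_congr ?_
    intro k hk
    rw [List.mem_range] at hk
    have hk' : (k : Int) < n - m - (i + 1) := by omega
    have hIH := ih (i + 1 + k) (by omega) (by omega)
    rw [List.map_map]
    show List.map (fun js => splitA a i ((i + 1 + (k : Int)) :: js)) _ = _
    have hstep : (fun js => splitA a i ((i + 1 + (k : Int)) :: js))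
        = fun js => PySem.List.slice a (some i) (some (i + 1 + (k : Int))) :: splitA a (i + 1 + (k : Int)) js := rfl
    rw [hstep, show (fun js => PySem.List.slice a (some i) (some (i + 1 + (k : Int))) :: splitA a (i + 1 + (k : Int)) js)
        = (fun l => PySem.List.slice a (some i) (some (i + 1 + (k : Int))) :: l) ∘ (splitA a (i + 1 + (k : Int))) from rfl,
      ← List.map_map, hIH]
    -- rewrite B's slices to drop/take of a
    rw [PySem.List.slice_from (a.drop i.toNat) (show (0:Int) ≤ 1 + k by omega),
        PySem.List.slice_to (a.drop i.toNat) (show (0:Int) ≤ 1 + k by omega),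
        List.drop_drop,
        show i.toNat + (1 + (k : Int)).toNat = (i + 1 + (k : Int)).toNat by omega,
        PySem.List.slice_toNat a h0 (show (0:Int) ≤ i + 1 + k by omega),
        show (i + 1 + (k : Int)).toNat - i.toNat = (1 + (k : Int)).toNat by omega]

-- ===== VERDICT (by name: the statement is the Claim_ definition above) =====
theorem segmentations_spec : Claim_equal_segmentations := by
  intro a k _ hpre
  unfold Spec_segmentations segmentations segmentations_alt
  obtain ⟨h1, h2⟩ := hpre
  simp only [if_pos (And.intro h1 h2)]
  have hm : k.toNat = (k - 1).toNat + 1 := by omega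
  have h := main_inv a (k - 1).toNat 0 le_rfl (by omega)
  simp only [Int.toNat_zero, List.drop_zero, zero_add] at h
  rw [hm]
  exact h
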